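-- pv_equiv track=rewrite | github.com/gbdubs/tl0 | tl0/analysis/apply_deps.py | is_transitively_redundant
-- ===== SOURCE A (Python) =====
-- def is_transitively_redundant(task_id, new_blocker, graph):
--     """Check if task_id can already reach new_blocker through existing edges."""
--     visited = set()
--     queue = []
--     for existing in graph.get(task_id, []):
--         if existing != new_blocker:
--             queue.append(existing)
--
--     while queue:
--         current = queue.pop(0)
--         if current == new_blocker:
--             return True
--         if current in visited:
--             continue
--         visited.add(current)
--         for neighbor in graph.get(current, []):
--             if neighbor not in visited:
--                 queue.append(neighbor)
--     return False
-- ===== SOURCE B (Python) =====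
-- def is_transitively_redundant(task_id, new_blocker, graph):
--     """Check if task_id can already reach new_blocker through existing edges."""
--     reached = {e for e in graph.get(task_id, []) if e != new_blocker}
--     while True:
--         frontier = {n for u in reached for n in graph.get(u, [])}
--         if frontier <= reached:
--             return new_blocker in reached
--         reached |= frontier
-- ===== Notes on version B (the rewrite author's own statement) =====
-- stated objective: simpler
-- what changed: Replaces the BFS worklist (queue with pop(0), per-node visited bookkeeping and early exit) by round-based set saturation: repeatedly union in the neighbour set of everything reached until a fixpoint, then a single membership test.
import Mathlib
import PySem

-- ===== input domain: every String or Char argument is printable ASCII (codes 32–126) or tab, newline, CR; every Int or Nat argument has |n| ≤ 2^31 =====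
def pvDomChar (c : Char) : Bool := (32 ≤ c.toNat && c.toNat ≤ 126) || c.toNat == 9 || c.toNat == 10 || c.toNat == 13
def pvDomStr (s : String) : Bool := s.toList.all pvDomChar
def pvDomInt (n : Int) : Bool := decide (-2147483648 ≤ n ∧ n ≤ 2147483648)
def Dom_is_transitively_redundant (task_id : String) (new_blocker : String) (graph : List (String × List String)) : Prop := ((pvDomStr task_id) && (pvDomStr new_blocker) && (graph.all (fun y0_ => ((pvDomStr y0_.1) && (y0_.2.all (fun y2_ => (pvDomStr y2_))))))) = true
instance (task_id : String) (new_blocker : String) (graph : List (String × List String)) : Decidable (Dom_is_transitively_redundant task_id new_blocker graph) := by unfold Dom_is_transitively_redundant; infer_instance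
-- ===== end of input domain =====

-- B replaces A's BFS worklist queue by round-based set saturation to a fixpoint; objective: simpler.


-- ===== PORT A =====
-- graph.get(u, []) on the association list (first match); shared by both ports
def pvLookup (graph : List (String × List String)) (u : String) : List String :=
  ((graph.find? (fun p => p.1 == u)).map Prod.snd).getD []

-- A's while-queue loop, with a fuel guard that only makes the loop total (proved sufficient below)
def pvBfsLoop (nb : String) (graph : List (String × List String)) :
    Nat → List String → PySem.Set String → Option Bool
  | 0, _, _ => none
  | f + 1, q, visited =>
    match q with
    | [] => some false
    | current :: rest =>
      if current = nb then some true
      else if current ∈ visited then pvBfsLoop nb graph f rest visited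
      else
        let visited' := PySem.Set.add visited current
        pvBfsLoop nb graph f
          (rest ++ (pvLookup graph current).filter (fun n => decide (n ∉ visited'))) visited'

-- fuel: one unit per pop; pops ≤ initial queue length + total edge count (pvBfsLoop_isSome)
def pvFuelA (graph : List (String × List String)) (seeds : List String) : Nat :=
  seeds.length + (graph.map (fun p => p.2.length)).sum + 1

def is_transitively_redundant (task_id : String) (new_blocker : String) (graph : List (String × List String)) : Bool :=
  let seeds := (pvLookup graph task_id).filter (fun e => decide (e ≠ new_blocker))
  (pvBfsLoop new_blocker graph (pvFuelA graph seeds) seeds PySem.Set.empty).getD false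

-- ===== PORT B =====
-- B's saturation loop, with a fuel guard that only makes the loop total (proved sufficient below)
def pvSatLoop (graph : List (String × List String)) :
    Nat → PySem.Set String → Option (PySem.Set String)
  | 0, _ => none
  | f + 1, reached =>
    let frontier := PySem.Set.ofList (reached.flatMap (fun u => pvLookup graph u))
    if PySem.Set.issubset frontier reached then some reached
    else pvSatLoop graph f (PySem.Set.union reached frontier)

-- fuel: one unit per round; each non-final round strictly grows `reached` inside the
-- universe seeds ++ all-neighbour-lists, so its size + 1 rounds always suffice
def pvFuelB (graph : List (String × List String)) (seeds : List String) : Nat :=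
  (seeds ++ graph.flatMap (fun p => p.2)).length + 1

def is_transitively_redundant_alt (task_id : String) (new_blocker : String) (graph : List (String × List String)) : Bool :=
  let seeds := PySem.Set.ofList ((pvLookup graph task_id).filter (fun e => decide (e ≠ new_blocker)))
  match pvSatLoop graph (pvFuelB graph seeds) seeds with
  | some reached => decide (new_blocker ∈ reached)
  | none => false

-- ===== PRECONDITION & SPEC =====
def Spec_is_transitively_redundant (task_id : String) (new_blocker : String) (graph : List (String × List String)) (out : Bool) : Prop := out = is_transitively_redundant_alt task_id new_blocker graph
instance (task_id : String) (new_blocker : String) (graph : List (String × List String)) (out : Bool) : Decidable (Spec_is_transitively_redundant task_id new_blocker graph out) := by unfold Spec_is_transitively_redundant; infer_instance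

-- ===== CLAIM (what is proved, stated in full; the proofs are below) =====
def Claim_equal_is_transitively_redundant : Prop := ∀ (task_id : String) (new_blocker : String) (graph : List (String × List String)), Dom_is_transitively_redundant task_id new_blocker graph → Spec_is_transitively_redundant task_id new_blocker graph (is_transitively_redundant task_id new_blocker graph)

-- ===== LEMMAS AND PROOFS =====

-- reachability from the seed list along graph edges: the common semantics of both loops
inductive PvReach (graph : List (String × List String)) (seeds : List String) : String → Prop
  | seed (x : String) (hx : x ∈ seeds) : PvReach graph seeds x
  | step (u v : String) (hu : PvReach graph seeds u) (hv : v ∈ pvLookup graph u) : PvReach graph seeds v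

theorem pvReach_subset_closed (graph : List (String × List String)) (seeds : List String)
    (v : List String) (hseed : ∀ s ∈ seeds, s ∈ v)
    (hclosed : ∀ u ∈ v, ∀ w ∈ pvLookup graph u, w ∈ v) :
    ∀ x, PvReach graph seeds x → x ∈ v := by
  intro x hx
  induction hx with
  | seed x hx => exact hseed x hx
  | step u w hu hw ih => exact hclosed u ih w hw

theorem pvLookup_mem (graph : List (String × List String)) (u w : String)
    (hw : w ∈ pvLookup graph u) : ∃ p ∈ graph, w ∈ p.2 := by
  unfold pvLookup at hw
  cases hfind : graph.find? (fun p => p.1 == u) with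
  | none => simp [hfind] at hw
  | some p =>
    refine ⟨p, List.mem_of_find?_eq_some hfind, ?_⟩
    simpa [hfind] using hw

-- remaining-edge potential for A's loop: total neighbour-list length of entries not yet visited
def pvE (graph : List (String × List String)) (v : List String) : Nat :=
  ((graph.filter (fun p => decide (p.1 ∉ v))).map (fun p => p.2.length)).sum

theorem pvE_cons (p : String × List String) (g : List (String × List String)) (v : List String) :
    pvE (p :: g) v = (if p.1 ∈ v then 0 else p.2.length) + pvE g v := by
  unfold pvE
  rw [List.filter_cons]
  by_cases h : p.1 ∈ v <;> simp [h]

theorem pvE_mono (graph : List (String × List String)) (v v' : List String)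
    (h : ∀ x ∈ v, x ∈ v') : pvE graph v' ≤ pvE graph v := by
  induction graph with
  | nil => simp [pvE]
  | cons p g ih =>
    rw [pvE_cons, pvE_cons]
    by_cases h2 : p.1 ∈ v
    · have h1 : p.1 ∈ v' := h _ h2
      simp only [if_pos h1, if_pos h2]; omega
    · by_cases h1 : p.1 ∈ v'
      · simp only [if_pos h1, if_neg h2]; omega
      · simp only [if_neg h1, if_neg h2]; omega

theorem pvE_drop (graph : List (String × List String)) (v : List String) (c : String)
    (hc : c ∉ v) : pvE graph (v ++ [c]) + (pvLookup graph c).length ≤ pvE graph v := by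
  induction graph with
  | nil => simp [pvE, pvLookup]
  | cons p g ih =>
    rw [pvE_cons, pvE_cons]
    by_cases hpc : p.1 = c
    · have hlk : pvLookup (p :: g) c = p.2 := by
        simp [pvLookup, hpc]
      have h1 : p.1 ∈ v ++ [c] := by simp [hpc]
      have h2 : p.1 ∉ v := hpc ▸ hc
      have hmono := pvE_mono g v (v ++ [c]) (fun x hx => by simp [hx])
      rw [hlk]
      simp only [if_pos h1, if_neg h2]
      omega
    · have hlk : pvLookup (p :: g) c = pvLookup g c := by
        simp [pvLookup, hpc]
      have hiff : (p.1 ∈ v ++ [c]) ↔ p.1 ∈ v := by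
        simp [List.mem_append]
        intro h; exact absurd h hpc
      rw [hlk]
      by_cases h2 : p.1 ∈ v
      · simp only [if_pos (hiff.mpr h2), if_pos h2]; omega
      · simp only [if_neg (fun hh => h2 (hiff.mp hh)), if_neg h2]; omega

theorem pvBfsLoop_isSome (nb : String) (graph : List (String × List String)) :
    ∀ (f : Nat) (q : List String) (v : PySem.Set String),
    q.length + pvE graph v < f → (pvBfsLoop nb graph f q v).isSome := by
  intro f
  induction f with
  | zero => intro q v h; omega
  | succ f ih =>
    intro q v h
    match q with
    | [] => simp [pvBfsLoop]
    | current :: rest =>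
      simp only [pvBfsLoop]
      by_cases h1 : current = nb
      · simp [h1]
      · simp only [h1, if_false]
        by_cases h2 : current ∈ v
        · simp only [h2, if_true]
          apply ih
          simp at h ⊢; omega
        · simp only [h2, if_false]
          have hadd : PySem.Set.add v current = v ++ [current] :=
            PySem.Set.add_of_not_mem h2
          have hdrop : pvE graph (PySem.Set.add v current) + (pvLookup graph current).length ≤ pvE graph v := by
            rw [hadd]; exact pvE_drop graph v current h2
          have hfl : ((pvLookup graph current).filter
              (fun n => decide (n ∉ PySem.Set.add v current))).length ≤ (pvLookup graph current).length :=
            List.length_filter_le _ _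
          apply ih
          rw [List.length_append]
          simp only [List.length_cons] at h
          omega

theorem pvBfsLoop_correct (nb : String) (graph : List (String × List String)) (seeds : List String) :
    ∀ (f : Nat) (q : List String) (v : PySem.Set String) (r : Bool),
    (∀ x ∈ q, PvReach graph seeds x) →
    (∀ x ∈ v, x ≠ nb) →
    (∀ u ∈ v, ∀ w ∈ pvLookup graph u, w ∈ v ∨ w ∈ q) →
    (∀ s ∈ seeds, s ∈ v ∨ s ∈ q) →
    pvBfsLoop nb graph f q v = some r →
    (r = true ↔ PvReach graph seeds nb) := by
  intro f
  induction f with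
  | zero => intro q v r _ _ _ _ h; simp [pvBfsLoop] at h
  | succ f ih =>
    intro q v r hq hv hinv hseed hrun
    match q with
    | [] =>
      simp [pvBfsLoop] at hrun
      subst hrun
      simp only [Bool.false_eq_true, false_iff]
      intro hreach
      have hsub := pvReach_subset_closed graph seeds v
        (fun s hs => (hseed s hs).resolve_right (by simp))
        (fun u hu w hw => (hinv u hu w hw).resolve_right (by simp))
      exact hv nb (hsub nb hreach) rfl
    | current :: rest =>
      simp only [pvBfsLoop] at hrun
      by_cases h1 : current = nb
      · simp [h1] at hrun
        subst hrun
        subst h1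
        simp only [true_iff]
        exact hq current (by simp)
      · simp only [h1, if_false] at hrun
        by_cases h2 : current ∈ v
        · simp only [h2, if_true] at hrun
          refine ih rest v r (fun x hx => hq x (by simp [hx])) hv ?_ ?_ hrun
          · intro u hu w hw
            rcases hinv u hu w hw with h | h
            · exact Or.inl h
            · rcases List.mem_cons.mp h with h | h
              · exact Or.inl (h ▸ h2)
              · exact Or.inr h
          · intro s hs
            rcases hseed s hs with h | h
            · exact Or.inl h
            · rcases List.mem_cons.mp h with h | h
              · exact Or.inl (h ▸ h2)
              · exact Or.inr h
        · simp only [h2, if_false] at hrun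
          have hcur : PvReach graph seeds current := hq current (by simp)
          have hadd : PySem.Set.add v current = v ++ [current] :=
            PySem.Set.add_of_not_mem h2
          have hmem : ∀ x : String, x ∈ PySem.Set.add v current ↔ (x ∈ v ∨ x = current) := by
            intro x; rw [hadd]; simp
          refine ih _ _ r ?_ ?_ ?_ ?_ hrun
          · intro x hx
            rcases List.mem_append.mp hx with h | h
            · exact hq x (by simp [h])
            · have := List.mem_filter.mp h
              exact PvReach.step current x hcur this.1
          · intro x hx
            rcases (hmem x).mp hx with h | h
            · exact hv x h
            · exact h ▸ h1
          · intro u hu w hw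
            rcases (hmem u).mp hu with h | h
            · rcases hinv u h w hw with h' | h'
              · exact Or.inl ((hmem w).mpr (Or.inl h'))
              · rcases List.mem_cons.mp h' with h' | h'
                · exact Or.inl ((hmem w).mpr (Or.inr h'))
                · exact Or.inr (List.mem_append.mpr (Or.inl h'))
            · rw [h] at hw
              by_cases hwv : w ∈ PySem.Set.add v current
              · exact Or.inl hwv
              · refine Or.inr (List.mem_append.mpr (Or.inr ?_))
                exact List.mem_filter.mpr ⟨hw, by simpa using hwv⟩
          · intro s hs
            rcases hseed s hs with h | h
            · exact Or.inl ((hmem s).mpr (Or.inl h))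
            · rcases List.mem_cons.mp h with h | h
              · exact Or.inl ((hmem s).mpr (Or.inr h))
              · exact Or.inr (List.mem_append.mpr (Or.inl h))

theorem pvA_iff (task_id nb : String) (graph : List (String × List String)) :
    (is_transitively_redundant task_id nb graph = true) ↔
      PvReach graph ((pvLookup graph task_id).filter (fun e => decide (e ≠ nb))) nb := by
  set seeds := (pvLookup graph task_id).filter (fun e => decide (e ≠ nb)) with hseeds
  have hE : pvE graph ([] : List String) = (graph.map (fun p => p.2.length)).sum := by
    unfold pvE
    congr 1
    congr 1
    apply List.filter_eq_self.mpr
    intro p _; simp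
  have hsome := pvBfsLoop_isSome nb graph (pvFuelA graph seeds) seeds []
    (by unfold pvFuelA; rw [hE]; omega)
  rcases Option.isSome_iff_exists.mp hsome with ⟨r, hr⟩
  have hcor := pvBfsLoop_correct nb graph seeds (pvFuelA graph seeds) seeds [] r
    (fun x hx => PvReach.seed x hx)
    (by simp)
    (by simp)
    (fun s hs => Or.inr hs)
    hr
  have hrfl : is_transitively_redundant task_id nb graph
      = (pvBfsLoop nb graph (pvFuelA graph seeds) seeds []).getD false := rfl
  rw [hrfl, hr]
  simpa using hcor

-- ---- B-side lemmas ----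

theorem pvSatLoop_mono (graph : List (String × List String)) :
    ∀ (f : Nat) (S S' : PySem.Set String), pvSatLoop graph f S = some S' →
    (∀ x ∈ S, x ∈ S') ∧ (∀ u ∈ S', ∀ w ∈ pvLookup graph u, w ∈ S') := by
  intro f
  induction f with
  | zero => intro S S' h; simp [pvSatLoop] at h
  | succ f ih =>
    intro S S' h
    simp only [pvSatLoop] at h
    by_cases hsub : PySem.Set.issubset
        (PySem.Set.ofList (S.flatMap (fun u => pvLookup graph u))) S = true
    · rw [if_pos hsub] at h
      cases h
      refine ⟨fun x hx => hx, ?_⟩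
      intro u hu w hw
      exact (PySem.Set.issubset_iff _ _).mp hsub w
        ((PySem.Set.mem_ofList _ _).mpr (List.mem_flatMap.mpr ⟨u, hu, hw⟩))
    · rw [if_neg hsub] at h
      have h' := ih _ _ h
      exact ⟨fun x hx => h'.1 x ((PySem.Set.mem_union _ _ _).mpr (Or.inl hx)), h'.2⟩

theorem pvSatLoop_sound (graph : List (String × List String)) (seeds : List String) :
    ∀ (f : Nat) (S S' : PySem.Set String),
    (∀ x ∈ S, PvReach graph seeds x) → pvSatLoop graph f S = some S' →
    ∀ x ∈ S', PvReach graph seeds x := by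
  intro f
  induction f with
  | zero => intro S S' _ h; simp [pvSatLoop] at h
  | succ f ih =>
    intro S S' hS h
    simp only [pvSatLoop] at h
    by_cases hsub : PySem.Set.issubset
        (PySem.Set.ofList (S.flatMap (fun u => pvLookup graph u))) S = true
    · rw [if_pos hsub] at h; cases h; exact hS
    · rw [if_neg hsub] at h
      refine ih _ _ ?_ h
      intro x hx
      rcases (PySem.Set.mem_union _ _ _).mp hx with hx | hx
      · exact hS x hx
      · rcases List.mem_flatMap.mp ((PySem.Set.mem_ofList _ _).mp hx) with ⟨u, hu, hw⟩
        exact PvReach.step u x (hS u hu) hw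

theorem pvSatLoop_isSome (graph : List (String × List String)) (U : List String)
    (hU : ∀ p ∈ graph, ∀ w ∈ p.2, w ∈ U) :
    ∀ (f : Nat) (S : PySem.Set String), (∀ x ∈ S, x ∈ U) →
    U.toFinset.card + 1 ≤ f + S.toFinset.card → (pvSatLoop graph f S).isSome := by
  intro f
  induction f with
  | zero =>
    intro S hSU h
    exfalso
    have hsub : S.toFinset ⊆ U.toFinset := fun x hx =>
      List.mem_toFinset.mpr (hSU x (List.mem_toFinset.mp hx))
    have := Finset.card_le_card hsub
    omega
  | succ f ih =>
    intro S hSU h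
    simp only [pvSatLoop]
    by_cases hsub : PySem.Set.issubset
        (PySem.Set.ofList (S.flatMap (fun u => pvLookup graph u))) S = true
    · simp [hsub]
    · rw [if_neg hsub]
      set fr := PySem.Set.ofList (S.flatMap (fun u => pvLookup graph u)) with hfr
      have hfrU : ∀ w ∈ fr, w ∈ U := by
        intro w hw
        rcases List.mem_flatMap.mp ((PySem.Set.mem_ofList _ _).mp hw) with ⟨u, _, hwu⟩
        rcases pvLookup_mem graph u w hwu with ⟨p, hp, hwp⟩
        exact hU p hp w hwp
      have hSU' : ∀ x ∈ PySem.Set.union S fr, x ∈ U := by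
        intro x hx
        rcases (PySem.Set.mem_union _ _ _).mp hx with hx | hx
        · exact hSU x hx
        · exact hfrU x hx
      have hx' : ∃ x, x ∈ fr ∧ x ∉ S := by
        by_contra hc
        push Not at hc
        exact hsub ((PySem.Set.issubset_iff _ _).mpr hc)
      obtain ⟨x, hxfr, hxS⟩ := hx'
      have hsubset : S.toFinset ⊆ (PySem.Set.union S fr).toFinset := fun y hy =>
        List.mem_toFinset.mpr ((PySem.Set.mem_union _ _ _).mpr
          (Or.inl (List.mem_toFinset.mp hy)))
      have hlt : S.toFinset.card < (PySem.Set.union S fr).toFinset.card := by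
        apply Finset.card_lt_card
        refine ⟨hsubset, fun hback => hxS ?_⟩
        exact List.mem_toFinset.mp (hback (List.mem_toFinset.mpr
          ((PySem.Set.mem_union _ _ _).mpr (Or.inr hxfr))))
      have hle : (PySem.Set.union S fr).toFinset.card ≤ U.toFinset.card :=
        Finset.card_le_card (fun y hy =>
          List.mem_toFinset.mpr (hSU' y (List.mem_toFinset.mp hy)))
      exact ih _ hSU' (by omega)

theorem pvB_iff (task_id nb : String) (graph : List (String × List String)) :
    (is_transitively_redundant_alt task_id nb graph = true) ↔
      PvReach graph ((pvLookup graph task_id).filter (fun e => decide (e ≠ nb))) nb := by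
  set seedsL := (pvLookup graph task_id).filter (fun e => decide (e ≠ nb)) with hseedsL
  set S0 : PySem.Set String := PySem.Set.ofList seedsL with hS0
  set U : List String := S0 ++ graph.flatMap (fun p => p.2) with hUdef
  have hU : ∀ p ∈ graph, ∀ w ∈ p.2, w ∈ U := by
    intro p hp w hw
    exact List.mem_append.mpr (Or.inr (List.mem_flatMap.mpr ⟨p, hp, hw⟩))
  have hS0U : ∀ x ∈ S0, x ∈ U := fun x hx => List.mem_append.mpr (Or.inl hx)
  have hcard : U.toFinset.card + 1 ≤ pvFuelB graph S0 + S0.toFinset.card := by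
    have h1 : U.toFinset.card ≤ U.length := List.toFinset_card_le U
    have h2 : pvFuelB graph S0 = U.length + 1 := by rw [hUdef]; rfl
    omega
  have hsome := pvSatLoop_isSome graph U hU (pvFuelB graph S0) S0 hS0U hcard
  rcases Option.isSome_iff_exists.mp hsome with ⟨S', hr⟩
  have hmono := pvSatLoop_mono graph (pvFuelB graph S0) S0 S' hr
  have hrfl : is_transitively_redundant_alt task_id nb graph
      = (match pvSatLoop graph (pvFuelB graph S0) S0 with
         | some reached => decide (nb ∈ reached)
         | none => false) := rfl
  constructor
  · intro halt
    rw [hrfl, hr] at halt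
    have hnb : nb ∈ S' := by simpa using halt
    exact pvSatLoop_sound graph seedsL (pvFuelB graph S0) S0 S'
      (fun x hx => PvReach.seed x ((PySem.Set.mem_ofList _ _).mp hx)) hr nb hnb
  · intro hreach
    have hnb : nb ∈ S' :=
      pvReach_subset_closed graph seedsL S'
        (fun s hs => hmono.1 s ((PySem.Set.mem_ofList _ _).mpr hs))
        hmono.2 nb hreach
    rw [hrfl, hr]
    simpa using hnb

-- ===== VERDICT (by name: the statement is the Claim_ definition above) =====
theorem is_transitively_redundant_spec : Claim_equal_is_transitively_redundant := by
  intro task_id nb graph _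
  unfold Spec_is_transitively_redundant
  have h := (pvA_iff task_id nb graph).trans (pvB_iff task_id nb graph).symm
  cases hA : is_transitively_redundant task_id nb graph <;>
    cases hB : is_transitively_redundant_alt task_id nb graph <;>
    simp_all
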